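-- pv_equiv track=rewrite | github.com/MacroMeng/PyLamina | src/helper.py | need_next_line
-- ===== SOURCE A (Python) =====
-- def need_next_line(line: str) -> bool:
--     """
--     判断是否需要下一行输入
--
--     :param line: 要判断的行字符串
--     :return: 是否需要下一行输入
--     """
--     l_brackets_count = [
--         line.count(char) for char in ("(", "[", "{")
--     ]
--     r_brackets_count = [
--         line.count(char) for char in (")", "]", "}")
--     ]
--     return l_brackets_count != r_brackets_count or line.endswith("\\")
-- ===== SOURCE B (Python) =====
-- def need_next_line(line: str) -> bool:
--     """Single pass keeping one signed balance per bracket type."""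
--     paren = square = brace = 0
--     for ch in line:
--         if ch == '(':
--             paren += 1
--         elif ch == ')':
--             paren -= 1
--         elif ch == '[':
--             square += 1
--         elif ch == ']':
--             square -= 1
--         elif ch == '{':
--             brace += 1
--         elif ch == '}':
--             brace -= 1
--     return paren != 0 or square != 0 or brace != 0 or line.endswith('\\')
-- ===== Notes on version B (the rewrite author's own statement) =====
-- stated objective: idiomatic
-- what changed: Replaces six separate substring-count scans plus a list comparison by one pass that keeps a signed balance per bracket type and tests the three balances for zero.
import Mathlib
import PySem

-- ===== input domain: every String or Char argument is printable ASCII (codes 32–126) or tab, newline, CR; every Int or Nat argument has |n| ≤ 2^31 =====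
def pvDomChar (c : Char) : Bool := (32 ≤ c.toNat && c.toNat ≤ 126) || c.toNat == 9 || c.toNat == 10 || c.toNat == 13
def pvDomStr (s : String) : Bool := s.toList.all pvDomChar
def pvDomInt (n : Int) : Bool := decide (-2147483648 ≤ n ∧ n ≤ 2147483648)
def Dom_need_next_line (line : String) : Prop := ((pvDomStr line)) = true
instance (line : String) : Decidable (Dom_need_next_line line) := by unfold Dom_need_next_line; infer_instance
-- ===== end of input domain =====

-- B replaces A's six substring-count scans + list comparison by one pass keeping a signed balance per bracket type (idiomatic).

-- ===== PORT A =====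
def need_next_line (line : String) : Bool :=
  let l_brackets_count : List Nat :=
    ["(", "[", "{"].map (fun ch => PySem.Str.count line ch)
  let r_brackets_count : List Nat :=
    [")", "]", "}"].map (fun ch => PySem.Str.count line ch)
  (l_brackets_count != r_brackets_count) || PySem.Str.endswith line "\\"

-- ===== PORT B =====
def need_next_line_alt (line : String) : Bool :=
  let bal : Int × Int × Int :=
    line.toList.foldl
      (fun (b : Int × Int × Int) ch =>
        if ch = '(' then (b.1 + 1, b.2.1, b.2.2)
        else if ch = ')' then (b.1 - 1, b.2.1, b.2.2)
        else if ch = '[' then (b.1, b.2.1 + 1, b.2.2)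
        else if ch = ']' then (b.1, b.2.1 - 1, b.2.2)
        else if ch = '{' then (b.1, b.2.1, b.2.2 + 1)
        else if ch = '}' then (b.1, b.2.1, b.2.2 - 1)
        else b)
      (0, 0, 0)
  (bal.1 != 0) || (bal.2.1 != 0) || (bal.2.2 != 0) || PySem.Str.endswith line "\\"

-- ===== PRECONDITION & SPEC =====
def Spec_need_next_line (line : String) (out : Bool) : Prop := out = need_next_line_alt line
instance (line : String) (out : Bool) : Decidable (Spec_need_next_line line out) := by unfold Spec_need_next_line; infer_instance

-- ===== CLAIM (what is proved, stated in full; the proofs are below) =====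
def Claim_equal_need_next_line : Prop := ∀ (line : String), Dom_need_next_line line → Spec_need_next_line line (need_next_line line)

-- ===== LEMMAS AND PROOFS =====

-- Chars.count with a single-character needle is List.count.
theorem chars_count_go_single (c : Char) (l : List Char) (fuel acc : Nat)
    (h : l.length ≤ fuel) :
    PySem.Chars.count.go [c] fuel l acc = acc + l.count c := by
  induction l generalizing fuel acc with
  | nil => cases fuel <;> simp [PySem.Chars.count.go]
  | cons x t ih =>
    cases fuel with
    | zero => simp at h
    | succ n =>
      rw [PySem.Chars.count.go]
      by_cases hx : x = c
      · subst hx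
        rw [if_pos (by simp [List.isPrefixOf])]
        simp only [List.length_cons, List.length_nil, Nat.zero_add, List.drop_succ_cons,
          List.drop_zero]
        rw [ih n (acc + 1) (by simp at h; omega)]
        simp [List.count_cons]
        omega
      · rw [if_neg (by simp [List.isPrefixOf]; exact Ne.symm hx)]
        rw [ih n acc (by simp at h; omega)]
        simp [List.count_cons, beq_iff_eq, fun hc => hx (Eq.symm hc)]
        exact hx

theorem count_single (s : List Char) (c : Char) :
    PySem.Chars.count s [c] = s.count c := by
  simpa [PySem.Chars.count] using chars_count_go_single c s s.length 0 le_rfl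

-- The fold computes the three balances as differences of per-type counts.
theorem foldl_bal (l : List Char) (a b c : Int) :
    l.foldl
      (fun (b : Int × Int × Int) ch =>
        if ch = '(' then (b.1 + 1, b.2.1, b.2.2)
        else if ch = ')' then (b.1 - 1, b.2.1, b.2.2)
        else if ch = '[' then (b.1, b.2.1 + 1, b.2.2)
        else if ch = ']' then (b.1, b.2.1 - 1, b.2.2)
        else if ch = '{' then (b.1, b.2.1, b.2.2 + 1)
        else if ch = '}' then (b.1, b.2.1, b.2.2 - 1)
        else b)
      (a, b, c)
    = (a + (l.count '(' : Int) - l.count ')',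
       b + (l.count '[' : Int) - l.count ']',
       c + (l.count '{' : Int) - l.count '}') := by
  induction l generalizing a b c with
  | nil => simp
  | cons x t ih =>
    simp only [List.foldl_cons]
    by_cases h1 : x = '('
    · subst h1
      rw [if_pos rfl, ih]
      simp [List.count_cons, Prod.ext_iff]
      all_goals omega
    by_cases h2 : x = ')'
    · subst h2
      rw [if_neg h1, if_pos rfl, ih]
      simp [List.count_cons, Prod.ext_iff]
      all_goals omega
    by_cases h3 : x = '['
    · subst h3
      rw [if_neg h1, if_neg h2, if_pos rfl, ih]
      simp [List.count_cons, Prod.ext_iff]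
      all_goals omega
    by_cases h4 : x = ']'
    · subst h4
      rw [if_neg h1, if_neg h2, if_neg h3, if_pos rfl, ih]
      simp [List.count_cons, Prod.ext_iff]
      all_goals omega
    by_cases h5 : x = '{'
    · subst h5
      rw [if_neg h1, if_neg h2, if_neg h3, if_neg h4, if_pos rfl, ih]
      simp [List.count_cons, Prod.ext_iff]
      all_goals omega
    by_cases h6 : x = '}'
    · subst h6
      rw [if_neg h1, if_neg h2, if_neg h3, if_neg h4, if_neg h5, if_pos rfl, ih]
      simp [List.count_cons, Prod.ext_iff]
      all_goals omega
    · rw [if_neg h1, if_neg h2, if_neg h3, if_neg h4, if_neg h5, if_neg h6, ih]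
      simp [List.count_cons, beq_iff_eq,
        fun hc => h1 (Eq.symm hc), fun hc => h2 (Eq.symm hc), fun hc => h3 (Eq.symm hc),
        fun hc => h4 (Eq.symm hc), fun hc => h5 (Eq.symm hc), fun hc => h6 (Eq.symm hc)]
      simp [h1, h2, h3, h4, h5, h6]

-- ===== VERDICT (by name: the statement is the Claim_ definition above) =====
theorem need_next_line_spec : Claim_equal_need_next_line := by
  intro line _
  unfold Spec_need_next_line need_next_line need_next_line_alt
  simp only [List.map, PySem.Str.count_eq, foldl_bal]
  have h1 : ("(" : String).toList = ['('] := by decide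
  have h2 : ("[" : String).toList = ['['] := by decide
  have h3 : ("{" : String).toList = ['{'] := by decide
  have h4 : (")" : String).toList = [')'] := by decide
  have h5 : ("]" : String).toList = [']'] := by decide
  have h6 : ("}" : String).toList = ['}'] := by decide
  rw [h1, h2, h3, h4, h5, h6]
  rw [count_single, count_single, count_single, count_single, count_single, count_single]
  cases he : PySem.Str.endswith line "\\"
  · simp only [he, Bool.or_false]
    rw [Bool.eq_iff_iff]
    simp only [bne_iff_ne, ne_eq, List.cons.injEq, and_true, Bool.or_eq_true]
    omega
  · simp [he]
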